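-- pv_equiv track=rewrite | github.com/kendallm/advent-of-code | 2024/day5.py | find_spot
-- ===== SOURCE A (Python) =====
-- def find_spot(afters, update, value):
--     spots = afters[value].intersection(set(update))
--     if spots is None:
--         return 0
--     for i, v in enumerate(update):
--         if len(spots) == 0:
--             return i
--         if v in spots:
--             spots.remove(v)
--     return i
-- ===== SOURCE B (Python) =====
-- def find_spot(afters, update, value):
--     spots = afters[value].intersection(update)
--     p = max((update.index(s) for s in spots), default=-1)
--     return min(p + 1, len(update) - 1)
-- ===== Notes on version B (the rewrite author's own statement) =====
-- stated objective: alternative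
-- what changed: Replaces A's depleting-set scan with a mid-loop early return by a closed form: the exhaustion point is the maximum first-occurrence index of the needed elements, so B computes max(update.index(s) for s in spots) and returns min(p + 1, len(update) - 1).
import Mathlib
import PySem

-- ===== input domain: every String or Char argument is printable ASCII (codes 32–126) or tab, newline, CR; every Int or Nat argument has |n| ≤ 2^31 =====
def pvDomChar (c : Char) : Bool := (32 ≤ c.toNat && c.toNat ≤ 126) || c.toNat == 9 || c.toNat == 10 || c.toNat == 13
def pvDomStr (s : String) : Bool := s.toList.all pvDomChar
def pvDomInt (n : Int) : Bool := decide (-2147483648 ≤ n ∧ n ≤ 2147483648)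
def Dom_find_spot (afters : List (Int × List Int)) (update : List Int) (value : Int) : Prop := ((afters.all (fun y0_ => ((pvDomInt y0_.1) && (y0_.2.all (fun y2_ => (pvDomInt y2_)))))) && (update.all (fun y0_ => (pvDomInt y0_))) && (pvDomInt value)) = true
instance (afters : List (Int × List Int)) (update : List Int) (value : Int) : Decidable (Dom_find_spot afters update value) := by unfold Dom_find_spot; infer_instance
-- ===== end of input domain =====

-- B replaces A's depleting-set scan (with its mid-loop early return) by a closed form:
-- the exhaustion index is the maximum first-occurrence index of the needed elements,
-- capped at the last index of update.


-- ===== PORT A =====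
-- the for-loop of A: 'for i, v in enumerate(update): if len(spots)==0: return i; if v in spots: spots.remove(v)'
-- followed by 'return i' (the last loop index, i.e. one less than the running counter when the list is exhausted)
def findSpotLoopA (spots : PySem.Set Int) (u : List Int) (i : Int) : Int :=
  match u with
  | [] => i - 1
  | v :: rest =>
    if PySem.List.len spots = 0 then i
    else if spots.contains v then findSpotLoopA (PySem.Set.discard spots v) rest (i + 1)
    else findSpotLoopA spots rest (i + 1)

def find_spot (afters : List (Int × List Int)) (update : List Int) (value : Int) : Int :=
  -- afters[value] (KeyError excluded by Pre_), .intersection(set(update));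
  -- A's 'if spots is None: return 0' is dead code (intersection never returns None) and is not ported
  let spots : PySem.Set Int :=
    PySem.Set.inter (PySem.Set.ofList (PySem.Dict.getD (PySem.Dict.mk afters) value [])) (PySem.Set.ofList update)
  findSpotLoopA spots update 0

-- ===== PORT B =====
def find_spot_alt (afters : List (Int × List Int)) (update : List Int) (value : Int) : Int :=
  let spots : PySem.Set Int :=
    PySem.Set.inter (PySem.Set.ofList (PySem.Dict.getD (PySem.Dict.mk afters) value [])) update
  -- p = max((update.index(s) for s in spots), default=-1)  (max over a set of ints: order-insensitive)
  let p : Int := spots.foldl (fun acc s => max acc (((PySem.List.index? update s).getD 0 : Nat) : Int)) (-1)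
  min (p + 1) (PySem.List.len update - 1)

-- ===== PRECONDITION & SPEC =====
-- Pre_ excludes exactly the inputs where A raises: value not a key of afters (KeyError) and
-- update == [] (the trailing 'return i' reads an unbound loop variable: NameError).
def Pre_find_spot (afters : List (Int × List Int)) (update : List Int) (value : Int) : Prop :=
  (PySem.Dict.get? (PySem.Dict.mk afters) value).isSome = true ∧ update ≠ []
instance (afters : List (Int × List Int)) (update : List Int) (value : Int) : Decidable (Pre_find_spot afters update value) := by unfold Pre_find_spot; infer_instance
def pvWitness_find_spot : (List (Int × List Int)) × List Int × Int := ([(1, [2])], [2, 3], 1)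

def Spec_find_spot (afters : List (Int × List Int)) (update : List Int) (value : Int) (out : Int) : Prop := out = find_spot_alt afters update value
instance (afters : List (Int × List Int)) (update : List Int) (value : Int) (out : Int) : Decidable (Spec_find_spot afters update value out) := by unfold Spec_find_spot; infer_instance

-- ===== CLAIM (what is proved, stated in full; the proofs are below) =====
def Claim_equal_find_spot : Prop := ∀ (afters : List (Int × List Int)) (update : List Int) (value : Int), Dom_find_spot afters update value → Pre_find_spot afters update value → Spec_find_spot afters update value (find_spot afters update value)

-- ===== LEMMAS AND PROOFS =====

-- shifting the base and every summand of a running max by 1 shifts the result by 1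
theorem foldl_max_shift (g : Int → Int) : ∀ (l : List Int) (b : Int),
    l.foldl (fun a s => max a (g s + 1)) (b + 1) = l.foldl (fun a s => max a (g s)) b + 1 := by
  intro l
  induction l with
  | nil => intro b; simp
  | cons s t ih =>
    intro b
    simp only [List.foldl_cons]
    have h : max (b + 1) (g s + 1) = max b (g s) + 1 := by omega
    rw [h, ih]

theorem foldl_max_shift_neg_one (g : Int → Int) (l : List Int) (hl : l ≠ [])
    (hg : ∀ s ∈ l, 0 ≤ g s) :
    l.foldl (fun a s => max a (g s + 1)) (-1) = l.foldl (fun a s => max a (g s)) (-1) + 1 := by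
  match l with
  | s :: t =>
    simp only [List.foldl_cons]
    have h0 : 0 ≤ g s := hg s (by simp)
    have h1 : max (-1 : Int) (g s + 1) = max (-1 : Int) (g s) + 1 := by omega
    rw [h1, foldl_max_shift]

-- the value of A's loop, as B's closed form, for any set S of distinct elements all occurring in u
theorem loopA_eq : ∀ (u S : List Int) (i : Int), u ≠ [] → S.Nodup → (∀ s ∈ S, s ∈ u) →
    findSpotLoopA S u i =
      i + min ((S.foldl (fun acc s => max acc (((PySem.List.index? u s).getD 0 : Nat) : Int)) (-1)) + 1)
              ((u.length : Int) - 1) := by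
  intro u
  induction u with
  | nil => intro S i hu; exact absurd rfl hu
  | cons v rest ih =>
    intro S i _ hnd hS
    by_cases hSnil : S = []
    · subst hSnil
      simp only [findSpotLoopA, PySem.List.len, List.length_nil, List.foldl_nil]
      have : (0 : Int) ≤ (rest.length : Int) := by positivity
      simp only [List.length_cons]
      push_cast
      omega
    · have hlen : ¬ (PySem.List.len S = 0) := by
        simp only [PySem.List.len_eq]
        intro h
        exact hSnil (List.eq_nil_of_length_eq_zero (by exact_mod_cast h))
      by_cases hv : v ∈ S
      · -- v in spots: spots.remove(v)
        have hcon : PySem.Set.contains S v = true := by simpa [PySem.Set.contains] using hv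
        simp only [findSpotLoopA]
        rw [if_neg hlen, if_pos hcon]
        -- S' = discard S v = S.filter (· ≠ v)
        set S' := PySem.Set.discard S v with hS'def
        have hS'sub : ∀ s ∈ S', s ∈ S ∧ s ≠ v := by
          intro s hs
          rw [hS'def, PySem.Set.discard] at hs
          have := List.mem_filter.mp hs
          refine ⟨this.1, by simpa using this.2⟩
        have hS'rest : ∀ s ∈ S', s ∈ rest := by
          intro s hs
          rcases hS'sub s hs with ⟨h1, h2⟩
          rcases List.mem_cons.mp (hS s h1) with h | h
          · exact absurd h h2
          · exact h
        have hS'nd : S'.Nodup := by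
          rw [hS'def, PySem.Set.discard]; exact hnd.filter _
        -- S is a permutation of v :: S'
        have herase : S.erase v = S' := by
          rw [hS'def, PySem.Set.discard, List.Nodup.erase_eq_filter hnd]
          rfl
        have hperm : S.Perm (v :: S') := by
          rw [← herase]; exact List.perm_cons_erase hv
        -- rewrite the fold over S via the permutation
        have hrc : RightCommutative (fun (a : Int) s => max a (((PySem.List.index? (v :: rest) s).getD 0 : Nat) : Int)) := by
          constructor; intro b a a'; rw [max_right_comm]
        have hfold := @List.Perm.foldl_eq _ _ (fun (a : Int) s => max a (((PySem.List.index? (v :: rest) s).getD 0 : Nat) : Int)) _ _ hrc hperm (-1 : Int)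
        rw [hfold]
        simp only [List.foldl_cons, PySem.List.index?_cons_self, Option.getD_some, Nat.cast_zero,
          max_eq_right (by omega : (-1 : Int) ≤ 0)]
        -- on S', the index in v :: rest is 1 + the index in rest
        have hcongr : S'.foldl (fun a s => max a (((PySem.List.index? (v :: rest) s).getD 0 : Nat) : Int)) 0
            = S'.foldl (fun a s => max a ((((PySem.List.index? rest s).getD 0 : Nat) : Int) + 1)) 0 := by
          apply PySem.List.foldl_congr_mem
          intro a s hs
          have hne : v ≠ s := fun h => (hS'sub s hs).2 h.symm
          rw [PySem.List.index?_cons_of_ne rest hne]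
          rcases Option.isSome_iff_exists.mp ((PySem.List.index?_isSome_iff _ _).mpr (hS'rest s hs)) with ⟨k, hk⟩
          rw [hk]
          simp
        rw [hcongr]
        have hshift : S'.foldl (fun a s => max a ((((PySem.List.index? rest s).getD 0 : Nat) : Int) + 1)) ((-1) + 1)
            = S'.foldl (fun a s => max a (((PySem.List.index? rest s).getD 0 : Nat) : Int)) (-1) + 1 :=
          foldl_max_shift _ S' (-1)
        rw [show (0 : Int) = (-1) + 1 by omega, hshift]
        set Q := S'.foldl (fun a s => max a (((PySem.List.index? rest s).getD 0 : Nat) : Int)) (-1) with hQ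
        have hQge : (-1 : Int) ≤ Q := (PySem.List.le_foldl_max_int S' _ (-1)).1
        by_cases hrest : rest = []
        · -- everything in S' lies in rest = [], so S' = [] and the loop returns (i+1)-1
          subst hrest
          have : S' = [] :=
            List.eq_nil_iff_forall_not_mem.mpr (fun a ha => List.not_mem_nil (hS'rest a ha))
          rw [this] at hQ ⊢
          simp only [findSpotLoopA, List.length_cons, List.length_nil]
          simp only [List.foldl_nil] at hQ
          omega
        · rw [ih S' (i + 1) hrest hS'nd hS'rest]
          have hrlen : (1 : Int) ≤ (rest.length : Int) := by
            have h0 : 0 < rest.length := List.length_pos_iff.mpr hrest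
            omega
          simp only [List.length_cons]
          push_cast
          omega
      · -- v not in spots: spots unchanged
        have hcon : ¬ PySem.Set.contains S v = true := by simpa [PySem.Set.contains] using hv
        simp only [findSpotLoopA]
        rw [if_neg hlen, if_neg hcon]
        have hSrest : ∀ s ∈ S, s ∈ rest := by
          intro s hs
          rcases List.mem_cons.mp (hS s hs) with h | h
          · exact absurd (h ▸ hs) hv
          · exact h
        have hrest : rest ≠ [] := by
          cases S with
          | nil => exact absurd rfl hSnil
          | cons a t =>
            intro h
            exact absurd (h ▸ hSrest a (by simp)) (by simp)
        have hcongr : S.foldl (fun a s => max a (((PySem.List.index? (v :: rest) s).getD 0 : Nat) : Int)) (-1)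
            = S.foldl (fun a s => max a ((((PySem.List.index? rest s).getD 0 : Nat) : Int) + 1)) (-1) := by
          apply PySem.List.foldl_congr_mem
          intro a s hs
          have hne : v ≠ s := fun h => hv (h ▸ hs)
          rw [PySem.List.index?_cons_of_ne rest hne]
          rcases Option.isSome_iff_exists.mp ((PySem.List.index?_isSome_iff _ _).mpr (hSrest s hs)) with ⟨k, hk⟩
          rw [hk]
          simp
        rw [hcongr, foldl_max_shift_neg_one _ S hSnil (fun s _ => by positivity)]
        rw [ih S (i + 1) hrest hnd hSrest]
        set Q := S.foldl (fun a s => max a (((PySem.List.index? rest s).getD 0 : Nat) : Int)) (-1) with hQ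
        have hQge : (-1 : Int) ≤ Q := (PySem.List.le_foldl_max_int S _ (-1)).1
        have hrlen : (1 : Int) ≤ (rest.length : Int) := by
          have h0 : 0 < rest.length := List.length_pos_iff.mpr hrest
          omega
        simp only [List.length_cons]
        push_cast
        omega

-- the two spots computations (A intersects with set(update), B with update) are the same list
theorem spots_eq (aval update : List Int) :
    PySem.Set.inter (PySem.Set.ofList aval) (PySem.Set.ofList update)
      = PySem.Set.inter (PySem.Set.ofList aval) update := by
  simp only [PySem.Set.inter]
  apply List.filter_congr
  intro x _
  simp [PySem.Set.mem_ofList]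

-- ===== VERDICT (by name: the statement is the Claim_ definition above) =====
theorem find_spot_spec : Claim_equal_find_spot := by
  intro afters update value _ hpre
  unfold Spec_find_spot find_spot find_spot_alt
  simp only
  rw [spots_eq]
  set S := PySem.Set.inter (PySem.Set.ofList (PySem.Dict.getD (PySem.Dict.mk afters) value [])) update with hSdef
  have hnd : S.Nodup := by
    rw [hSdef, PySem.Set.inter]
    exact (PySem.Set.nodup_ofList _).filter _
  have hS : ∀ s ∈ S, s ∈ update := by
    intro s hs
    rw [hSdef, PySem.Set.inter] at hs
    have := (List.mem_filter.mp hs).2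
    simpa [List.contains_iff_mem] using this
  rw [loopA_eq update S 0 hpre.2 hnd hS]
  simp only [PySem.List.len_eq]
  omega
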